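-- pv_equiv track=rewrite | github.com/githubTB/jn_rag | extractor/excel_extractor.py | _has_non_key_cell_value
-- ===== SOURCE A (Python) =====
-- def _has_non_key_cell_value(row_values: dict[int, str], col_map: dict[int, str]) -> bool:
--     """
--     通用数据有效性判断：
--     - 若表头只有 1 列，只要该列非空即可
--     - 若表头有多列，要求至少一个“非首列”有值
--     """
--     if not col_map:
--         return False
--     ordered_cols = sorted(col_map.keys())
--     if len(ordered_cols) == 1:
--         return bool((row_values.get(ordered_cols[0]) or "").strip())
--     for col_idx in ordered_cols[1:]:
--         if (row_values.get(col_idx) or "").strip():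
--             return True
--     return False
-- ===== SOURCE B (Python) =====
-- def _has_non_key_cell_value(row_values: dict[int, str], col_map: dict[int, str]) -> bool:
--     # Walk the ROW instead of the header: a cell validates the row iff it is
--     # non-blank, its column is mapped, and some mapped column lies strictly to
--     # its left (i.e. it is not the first header column).  Single-column headers
--     # are the only special case.
--     if not col_map:
--         return False
--     if len(col_map) == 1:
--         (only_col,) = col_map
--         return bool((row_values.get(only_col) or "").strip())
--     for col, val in row_values.items():
--         if (val or "").strip() and col in col_map and any(k < col for k in col_map):
--             return True
--     return False
-- ===== Notes on version B (the rewrite author's own statement) =====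
-- stated objective: alternative
-- what changed: A sorts the header keys and scans the tail, looking each column up in the row; B never sorts and never isolates a first column: it iterates the row's own cells once and accepts a cell iff it is non-blank, its column is mapped, and some mapped column lies strictly to its left (a membership/comparison test replacing the sorted order).
import Mathlib
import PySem

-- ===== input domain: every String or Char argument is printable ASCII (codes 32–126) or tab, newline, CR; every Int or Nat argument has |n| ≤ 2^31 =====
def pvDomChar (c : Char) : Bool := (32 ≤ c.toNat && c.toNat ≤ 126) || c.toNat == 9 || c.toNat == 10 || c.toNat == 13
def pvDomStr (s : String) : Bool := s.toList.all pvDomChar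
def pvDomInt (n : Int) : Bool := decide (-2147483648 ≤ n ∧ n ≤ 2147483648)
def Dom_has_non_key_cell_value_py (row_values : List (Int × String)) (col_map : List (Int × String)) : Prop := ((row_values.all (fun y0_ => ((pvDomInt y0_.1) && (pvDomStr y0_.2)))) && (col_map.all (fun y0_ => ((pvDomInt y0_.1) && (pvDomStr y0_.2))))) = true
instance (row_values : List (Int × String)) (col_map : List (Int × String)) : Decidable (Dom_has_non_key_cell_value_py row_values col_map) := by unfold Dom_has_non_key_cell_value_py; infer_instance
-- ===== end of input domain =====

-- B walks the row's own cells (non-blank ∧ column mapped ∧ some mapped column strictly to its left) instead of A's sort-header-then-scan-tail; alternative traversal, order-independent boolean.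


-- ===== PORT A =====
-- (row_values.get(c) or "").strip() truthiness: get → Option.getD "" is exact (None and "" both collapse to "" under `or ""`)
def has_non_key_cell_value_py (row_values : List (Int × String)) (col_map : List (Int × String)) : Bool :=
  let rv := PySem.Dict.ofList row_values
  let cm := PySem.Dict.ofList col_map
  if cm.size == 0 then false
  else
    let ordered_cols := PySem.List.sorted cm.keys (fun k => k) false
    if ordered_cols.length == 1 then
      -- ordered_cols[0] on the length-1 list
      PySem.Str.strip ((rv.get? ordered_cols.headI).getD "") != ""
    else
      -- for col_idx in ordered_cols[1:]: early-return-True loop = any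
      (PySem.List.slice ordered_cols (some 1) none).any
        (fun c => PySem.Str.strip ((rv.get? c).getD "") != "")

-- ===== PORT B =====
-- `(only_col,) = col_map` unpacks the single key = keys.headI; `(val or "").strip()` on a dict value (always a str) = strip val
def has_non_key_cell_value_py_alt (row_values : List (Int × String)) (col_map : List (Int × String)) : Bool :=
  let rv := PySem.Dict.ofList row_values
  let cm := PySem.Dict.ofList col_map
  if cm.size == 0 then false
  else if cm.size == 1 then
    PySem.Str.strip ((rv.get? cm.keys.headI).getD "") != ""
  else
    rv.items.any (fun p =>
      (PySem.Str.strip p.2 != "") &&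
        (cm.contains p.1 && cm.keys.any (fun k => decide (k < p.1))))

-- ===== PRECONDITION & SPEC =====
def Spec_has_non_key_cell_value_py (row_values : List (Int × String)) (col_map : List (Int × String)) (out : Bool) : Prop := out = has_non_key_cell_value_py_alt row_values col_map
instance (row_values : List (Int × String)) (col_map : List (Int × String)) (out : Bool) : Decidable (Spec_has_non_key_cell_value_py row_values col_map out) := by unfold Spec_has_non_key_cell_value_py; infer_instance

-- ===== CLAIM =====
def Claim_equal_has_non_key_cell_value_py : Prop := ∀ (row_values : List (Int × String)) (col_map : List (Int × String)), Dom_has_non_key_cell_value_py row_values col_map → Spec_has_non_key_cell_value_py row_values col_map (has_non_key_cell_value_py row_values col_map)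

-- ===== LEMMAS AND PROOFS =====

-- membership in the tail of sorted(ks): exactly the non-minimal elements
theorem pv_mem_tail_sorted (ks : List Int) (hnd : ks.Nodup) (c : Int) :
    c ∈ (PySem.List.sorted ks (fun k => k) false).tail ↔ c ∈ ks ∧ ∃ k ∈ ks, k < c := by
  rcases hs : PySem.List.sorted ks (fun k => k) false with _ | ⟨m, t⟩
  · have : ks = [] := (PySem.List.sorted_eq_nil_iff ks (fun k => k) false).mp hs
    subst this; simp
  · have hperm : (m :: t).Perm ks := hs ▸ PySem.List.sorted_perm ks (fun k => k) false
    have hnd' : (m :: t).Nodup := hperm.nodup_iff.mpr hnd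
    have hmle : ∀ y ∈ ks, m ≤ y := PySem.List.key_head_sorted_le ks (fun k => k) hs
    simp only [List.tail_cons]
    constructor
    · intro hc
      have hcks : c ∈ ks := hperm.mem_iff.mp (List.mem_cons_of_mem _ hc)
      have hmne : m ≠ c := fun h => (List.nodup_cons.mp hnd').1 (h ▸ hc)
      exact ⟨hcks, m, hperm.mem_iff.mp List.mem_cons_self,
        lt_of_le_of_ne (hmle c hcks) hmne⟩
    · rintro ⟨hcks, k, hk, hlt⟩
      have hmlt : m < c := lt_of_le_of_lt (hmle k hk) hlt
      rcases List.mem_cons.mp (hperm.mem_iff.mpr hcks) with h | h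
      · exact absurd h.symm (ne_of_lt hmlt)
      · exact h

-- a predicate over the row's items versus lookups through get?
theorem pv_items_any (rvd : PySem.Dict Int String) (hnd : rvd.keys.Nodup) (R : Int → Bool) :
    (rvd.items.any (fun p => (PySem.Str.strip p.2 != "") && R p.1)) = true
      ↔ ∃ c, (PySem.Str.strip ((rvd.get? c).getD "") != "") = true ∧ R c = true := by
  simp only [List.any_eq_true, Bool.and_eq_true]
  constructor
  · rintro ⟨⟨c, v⟩, hmem, hstrip, hR⟩
    refine ⟨c, ?_, hR⟩
    rw [PySem.Dict.get?_of_mem_items rvd hmem hnd]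
    exact hstrip
  · rintro ⟨c, hstrip, hR⟩
    rcases hg : rvd.get? c with _ | v
    · rw [hg] at hstrip; simp [PySem.Str.strip, PySem.Chars.strip, PySem.Chars.lstrip, PySem.Chars.rstrip] at hstrip
    · rw [hg] at hstrip
      exact ⟨(c, v), PySem.Dict.mem_items_of_get?_eq_some rvd hg, hstrip, hR⟩

theorem has_non_key_cell_value_py_spec : Claim_equal_has_non_key_cell_value_py := by
  intro row_values col_map _
  unfold Spec_has_non_key_cell_value_py has_non_key_cell_value_py has_non_key_cell_value_py_alt
  set rvd := PySem.Dict.ofList row_values with hrvd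
  set cmd := PySem.Dict.ofList col_map with hcmd
  have hndc : cmd.keys.Nodup := PySem.Dict.nodup_keys_ofList col_map
  have hndr : rvd.keys.Nodup := PySem.Dict.nodup_keys_ofList row_values
  have hsz : cmd.size = cmd.keys.length := by
    simp [PySem.Dict.size, PySem.Dict.keys]
  have hslen : (PySem.List.sorted cmd.keys (fun k => k) false).length = cmd.keys.length :=
    PySem.List.length_sorted cmd.keys (fun k => k) false
  simp only [hsz, hslen]
  by_cases h0 : cmd.keys.length = 0
  · simp [h0]
  · by_cases h1 : cmd.keys.length = 1
    · -- single column: sorted of a singleton is itself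
      rcases ks : cmd.keys with _ | ⟨a, t⟩
      · rw [ks] at h0; simp at h0
      · rcases t with _ | ⟨b, t⟩
        · have hs1 : PySem.List.sorted [a] (fun k => (k : Int)) false = [a] :=
            PySem.List.sorted_eq_self_of_pairwise [a] (fun k => (k : Int)) (by simp)
          simp [hs1]
        · rw [ks] at h1; simp at h1
    · -- multi column
      rw [if_neg (by simpa using h0), if_neg (by simpa using h1),
          if_neg (by simpa using h0), if_neg (by simpa using h1)]
      rw [PySem.List.slice_from_one]
      rw [Bool.eq_iff_iff]
      rw [pv_items_any rvd hndr
        (fun c => cmd.contains c && cmd.keys.any (fun k => decide (k < c)))]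
      simp only [List.any_eq_true, Bool.and_eq_true, decide_eq_true_eq,
        PySem.Dict.contains_iff_mem_keys]
      constructor
      · rintro ⟨c, hc, hP⟩
        have := (pv_mem_tail_sorted cmd.keys hndc c).mp hc
        exact ⟨c, hP, this.1, this.2⟩
      · rintro ⟨c, hP, hcm, hk⟩
        exact ⟨c, (pv_mem_tail_sorted cmd.keys hndc c).mpr ⟨hcm, hk⟩, hP⟩

-- ===== VERDICT =====
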